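-- pv_equiv track=rewrite | github.com/martelli/url_shortener | lib/base62.py | hex2base62
-- ===== SOURCE A (Python) =====
-- DIGITS = "0123456789abcdefghijklmnopqrstuvwxyzABCDEFGHIJKLMNOPQRSTUVWXYZ"
--
-- NUM_DIGITS = 62
--
-- def hex2base62(hex_value=""):
--     """Encodes a decimal value as a base 62 number with the given DIGITS above.
--
--        Since 62**2 > 2**32, we fix the output in 6 base62 digits.
--     """
--     output = []
--
--     if (int_value := int(hex_value, 16)) > 4294967295:
--         raise ValueError(f"{int_value} is too large")
--
--     # forcefully generate 6 digits, thus padding smaller values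
--     for _ in range(6):
--         int_value, remainder = divmod(int_value, NUM_DIGITS)
--         output.append(DIGITS[remainder])
--     return "".join(reversed(output))
-- ===== SOURCE B (Python) =====
-- DIGITS = "0123456789abcdefghijklmnopqrstuvwxyzABCDEFGHIJKLMNOPQRSTUVWXYZ"
--
-- NUM_DIGITS = 62
--
-- def hex2base62(hex_value=""):
--     """Encodes a hex string as a fixed-width 6-digit base 62 number."""
--     if (int_value := int(hex_value, 16)) > 4294967295:
--         raise ValueError(f"{int_value} is too large")
--     # most-significant digit first: each digit read directly off int_value
--     return "".join(DIGITS[(int_value // NUM_DIGITS ** i) % NUM_DIGITS]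
--                    for i in range(5, -1, -1))
-- ===== Notes on version B (the rewrite author's own statement) =====
-- stated objective: alternative
-- what changed: Each of the 6 digits is computed positionally from the unchanged value as (int_value // 62**i) % 62, emitted most-significant-first, instead of threading a running quotient through repeated divmod and reversing the collected list.
import Mathlib
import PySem

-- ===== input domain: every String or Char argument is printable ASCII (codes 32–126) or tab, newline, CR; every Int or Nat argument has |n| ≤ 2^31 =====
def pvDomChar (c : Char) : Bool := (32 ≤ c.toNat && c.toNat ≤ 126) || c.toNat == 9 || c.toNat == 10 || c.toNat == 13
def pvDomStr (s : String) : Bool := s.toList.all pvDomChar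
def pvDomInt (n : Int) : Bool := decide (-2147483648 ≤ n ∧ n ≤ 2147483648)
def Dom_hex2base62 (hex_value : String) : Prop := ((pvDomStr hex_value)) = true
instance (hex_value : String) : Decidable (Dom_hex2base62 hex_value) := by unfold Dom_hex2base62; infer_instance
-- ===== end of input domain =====

-- B computes each of the 6 digits positionally from the unchanged value ((n // 62**i) % 62,
-- most-significant first, no reverse) instead of threading a running quotient through divmod.

def pvDIGITS : String := "0123456789abcdefghijklmnopqrstuvwxyzABCDEFGHIJKLMNOPQRSTUVWXYZ"

-- ===== PORT A =====
def hex2base62 (hex_value : String) : String :=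
  match PySem.Int.ofStrBase? hex_value 16 with
  | none => ""          -- int() raises ValueError: outside Pre_
  | some int_value =>
    if int_value > 4294967295 then ""   -- explicit raise ValueError: outside Pre_
    else
      -- for _ in range(6): int_value, remainder = divmod(int_value, 62); output.append(DIGITS[remainder])
      let st := (List.range 6).foldl
        (fun (st : Int × List Char) _ =>
          let q := PySem.Int.floordiv st.1 62
          let r := PySem.Int.mod st.1 62
          (q, st.2 ++ [(PySem.Str.pyGet? pvDIGITS r).getD ' ']))
        (int_value, [])
      String.mk st.2.reverse

-- ===== PORT B =====
def hex2base62_alt (hex_value : String) : String :=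
  match PySem.Int.ofStrBase? hex_value 16 with
  | none => ""
  | some int_value =>
    if int_value > 4294967295 then ""
    else
      String.mk ((PySem.List.pyRange 5 (-1) (-1)).map
        (fun i => (PySem.Str.pyGet? pvDIGITS
          (PySem.Int.mod (PySem.Int.floordiv int_value ((62:Int) ^ i.toNat)) 62)).getD ' '))

-- ===== PRECONDITION & SPEC =====
-- A raises ValueError when int(hex_value, 16) fails or the parsed value exceeds 4294967295.
def Pre_hex2base62 (hex_value : String) : Prop :=
  ((PySem.Int.ofStrBase? hex_value 16).getD 4294967296) ≤ 4294967295
instance (hex_value : String) : Decidable (Pre_hex2base62 hex_value) := by unfold Pre_hex2base62; infer_instance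
def pvWitness_hex2base62 : String := "ff"

def Spec_hex2base62 (hex_value : String) (out : String) : Prop := out = hex2base62_alt hex_value
instance (hex_value : String) (out : String) : Decidable (Spec_hex2base62 hex_value out) := by unfold Spec_hex2base62; infer_instance

-- ===== CLAIM (what is proved, stated in full; the proofs are below) =====
def Claim_equal_hex2base62 : Prop := ∀ (hex_value : String), Dom_hex2base62 hex_value → Pre_hex2base62 hex_value → Spec_hex2base62 hex_value (hex2base62 hex_value)

-- ===== LEMMAS AND PROOFS =====

theorem pv_ediv_ediv (a b c : Int) (hb : (0:Int) ≤ b) (habc : b * c = bc) :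
    a / b / c = a / bc := by
  rw [Int.ediv_ediv_of_nonneg hb, habc]

theorem pv_core_eq (n : Int) :
    (((List.range 6).foldl
        (fun (st : Int × List Char) _ =>
          let q := PySem.Int.floordiv st.1 62
          let r := PySem.Int.mod st.1 62
          (q, st.2 ++ [(PySem.Str.pyGet? pvDIGITS r).getD ' ']))
        (n, [])).2).reverse =
    (PySem.List.pyRange 5 (-1) (-1)).map
        (fun i => (PySem.Str.pyGet? pvDIGITS
          (PySem.Int.mod (PySem.Int.floordiv n ((62:Int) ^ i.toNat)) 62)).getD ' ') := by
  have d2 : ∀ a : Int, a / 62 / 62 = a / 3844 := fun a => pv_ediv_ediv a 62 62 (by norm_num) (by norm_num)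
  have d3 : ∀ a : Int, a / 3844 / 62 = a / 238328 := fun a => pv_ediv_ediv a 3844 62 (by norm_num) (by norm_num)
  have d4 : ∀ a : Int, a / 238328 / 62 = a / 14776336 := fun a => pv_ediv_ediv a 238328 62 (by norm_num) (by norm_num)
  have d5 : ∀ a : Int, a / 14776336 / 62 = a / 916132832 := fun a => pv_ediv_ediv a 14776336 62 (by norm_num) (by norm_num)
  have p2 : (62:Int) ^ Int.toNat 2 = 3844 := by decide
  have p3 : (62:Int) ^ Int.toNat 3 = 238328 := by decide
  have p4 : (62:Int) ^ Int.toNat 4 = 14776336 := by decide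
  have p5 : (62:Int) ^ Int.toNat 5 = 916132832 := by decide
  simp only [show List.range 6 = [0, 1, 2, 3, 4, 5] by decide, List.foldl,
    show PySem.List.pyRange 5 (-1) (-1) = [5, 4, 3, 2, 1, 0] by decide, List.map]
  norm_num [PySem.Int.floordiv_eq_ediv_of_pos (show (0:Int) < 62 by norm_num), d2, d3, d4, d5, p2, p3, p4, p5]

-- ===== VERDICT (by name: the statement is the Claim_ definition above) =====
theorem hex2base62_spec : Claim_equal_hex2base62 := by
  intro s _ hpre
  unfold Spec_hex2base62 hex2base62 hex2base62_alt
  cases h : PySem.Int.ofStrBase? s 16 with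
  | none => rfl
  | some n =>
    simp only []
    split
    · rfl
    · exact congrArg String.mk (pv_core_eq n)
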